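-- pv_equiv track=rewrite | github.com/doheuncho/TIL | HackerRank/3Month Preparation Kit/Week7/Week7_The_Bomberman_Game.py | flipped
-- ===== SOURCE A (Python) =====
-- def flipped(g):
--     grid = g.copy()
--     m = len(grid)
--     n = len(grid[0])
--     fgrid = []
--     for i in range(m):
--         raw = ''
--         for j in range(n):
--             if grid[i][j] == 'O' \
--             or grid[i][j] == '*' \
--             or (i-1 >=0 and grid[i-1][j] == 'O')    \
--             or (i+1 < m and grid[i+1][j] == 'O')    \
--             or (j-1 >=0 and grid[i][j-1] == 'O')    \
--             or (j+1 < n and grid[i][j+1] == 'O')    :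
--                 raw += '*'
--             else:
--                 raw += '.'
--         fgrid.append(raw)
--     dgrid = []
--     for i in range(m):
--         raw = ''
--         for j in range(n):
--             raw += '.' if fgrid[i][j] == '*' else 'O'
--         dgrid.append(raw)
--     return dgrid
-- ===== SOURCE B (Python) =====
-- def flipped(g):
--     n = len(g[0])
--     rows = [r[:n] for r in g]
--     pad = '.' * n
--     ups = [pad] + rows[:-1]
--     downs = rows[1:] + [pad]
--     out = []
--     for cur, up, down in zip(rows, ups, downs):
--         left = '.' + cur[:-1]
--         right = cur[1:] + '.'
--         out.append(''.join('.' if (c in 'O*' or 'O' in (u, d, l, r)) else 'O'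
--                            for c, u, d, l, r in zip(cur, up, down, left, right)))
--     return out
-- ===== Notes on version B (the rewrite author's own statement) =====
-- stated objective: alternative
-- what changed: A builds an intermediate '*'/'.' grid by two index-based gather passes over range(m) x range(n); B makes one pass that aligns each row with its vertically and horizontally shifted copies (padding with '.') via zip and reads each cell and its four neighbours positionally, with no index arithmetic and no intermediate grid.
import Mathlib
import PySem

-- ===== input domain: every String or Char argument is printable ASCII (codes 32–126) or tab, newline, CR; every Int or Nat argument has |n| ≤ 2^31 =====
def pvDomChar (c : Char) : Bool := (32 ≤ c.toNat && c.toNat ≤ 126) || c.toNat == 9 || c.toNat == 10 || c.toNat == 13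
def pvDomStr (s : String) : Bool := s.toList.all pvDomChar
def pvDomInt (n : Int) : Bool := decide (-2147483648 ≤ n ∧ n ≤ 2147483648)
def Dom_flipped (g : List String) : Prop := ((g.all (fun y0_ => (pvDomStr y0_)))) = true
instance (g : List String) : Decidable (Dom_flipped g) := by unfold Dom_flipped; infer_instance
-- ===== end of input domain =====

-- B replaces A's two index-based gather passes by a single shift-and-zip pass (no index arithmetic); objective: alternative.

-- ===== PORT A =====
-- grid[i][j] as an Option (none = IndexError, those inputs are excluded by Pre_)
def aGetC (grid : List String) (i j : Int) : Option Char :=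
  (PySem.List.pyGet? grid i).bind (fun s => PySem.Str.pyGet? s j)

def flipped (g : List String) : List String :=
  let grid := g
  let m : Int := PySem.List.len grid
  let n : Int := PySem.Str.len (PySem.List.pyGetD grid 0 "")
  let fgrid : List (List Char) :=
    (PySem.List.pyRange 0 m 1).foldl (fun fg i =>
      fg ++ [(PySem.List.pyRange 0 n 1).foldl (fun raw j =>
        raw ++ [if (aGetC grid i j == some 'O') || (aGetC grid i j == some '*')
            || (decide (0 ≤ i - 1) && (aGetC grid (i-1) j == some 'O'))
            || (decide (i + 1 < m) && (aGetC grid (i+1) j == some 'O'))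
            || (decide (0 ≤ j - 1) && (aGetC grid i (j-1) == some 'O'))
            || (decide (j + 1 < n) && (aGetC grid i (j+1) == some 'O'))
            then '*' else '.']) []]) []
  (PySem.List.pyRange 0 m 1).foldl (fun dg i =>
    dg ++ [String.ofList ((PySem.List.pyRange 0 n 1).foldl (fun raw j =>
      raw ++ [if ((PySem.List.pyGet? fgrid i).bind (fun r => PySem.List.pyGet? r j)) == some '*'
              then '.' else 'O']) [])]) []

-- ===== PORT B =====
-- the join-generator of Source B: one output char per position of zip(cur, up, down, left, right)
def bRow : List Char → List Char → List Char → List Char → List Char → List Char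
  | c :: cs, u :: us, d :: ds, l :: ls, r :: rs =>
      (if c == 'O' || c == '*' || u == 'O' || d == 'O' || l == 'O' || r == 'O'
       then '.' else 'O') :: bRow cs us ds ls rs
  | _, _, _, _, _ => []

def flipped_alt (g : List String) : List String :=
  let n : Int := PySem.Str.len (PySem.List.pyGetD g 0 "")
  let rows : List (List Char) := g.map (fun r => PySem.List.slice r.toList none (some n))
  let pad : List Char := PySem.List.pyRepeat ['.'] n
  let ups : List (List Char) := pad :: PySem.List.slice rows none (some (-1))
  let downs : List (List Char) := PySem.List.slice rows (some 1) none ++ [pad]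
  (rows.zip (ups.zip downs)).foldl (fun out p =>
    out ++ [String.ofList (bRow p.1 p.2.1 p.2.2
              ('.' :: PySem.List.slice p.1 none (some (-1)))
              (PySem.List.slice p.1 (some 1) none ++ ['.']))]) []

-- ===== PRECONDITION & SPEC =====
-- Pre_ excludes exactly the inputs where Python A raises IndexError: the empty grid (g[0]) and
-- grids with a row shorter than row 0 (A reads column j < len(g[0]) of every row).
def Pre_flipped (g : List String) : Prop :=
  g ≠ [] ∧ ∀ r ∈ g, (g.headD "").toList.length ≤ r.toList.length
instance (g : List String) : Decidable (Pre_flipped g) := by unfold Pre_flipped; infer_instance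

def pvWitness_flipped : List String := ["O..", ".*.", "..O"]

def Spec_flipped (g : List String) (out : List String) : Prop := out = flipped_alt g
instance (g : List String) (out : List String) : Decidable (Spec_flipped g out) := by unfold Spec_flipped; infer_instance

-- ===== CLAIM (what is proved, stated in full; the proofs are below) =====
def Claim_equal_flipped : Prop := ∀ (g : List String), Dom_flipped g → Pre_flipped g → Spec_flipped g (flipped g)

-- ===== LEMMAS AND PROOFS =====

-- the common per-cell description both ports are reduced to
def pvRows (g : List String) : List (List Char) :=
  g.map (fun r => r.toList.take (g.headD "").toList.length)

def pvCell (G : List (List Char)) (i j : Nat) : Char := (G.getD i []).getD j 'x'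

def pvCond (G : List (List Char)) (n0 i j : Nat) : Bool :=
  (pvCell G i j == 'O') || (pvCell G i j == '*')
  || (decide (0 < i) && (pvCell G (i-1) j == 'O'))
  || (decide (i+1 < G.length) && (pvCell G (i+1) j == 'O'))
  || (decide (0 < j) && (pvCell G i (j-1) == 'O'))
  || (decide (j+1 < n0) && (pvCell G i (j+1) == 'O'))

def pvTarget (G : List (List Char)) (n0 : Nat) : List String :=
  (List.range G.length).map (fun i =>
    String.ofList ((List.range n0).map (fun j => if pvCond G n0 i j then '.' else 'O')))

theorem aGetC_eq (g : List String) (h : Pre_flipped g) {i j : Nat} (hi : i < g.length)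
    (hj : j < (g.headD "").toList.length) :
    aGetC g ↑i ↑j = some (pvCell (pvRows g) i j) := by
  have hlen : (g.headD "").toList.length ≤ (g[i]).toList.length := h.2 _ (g.getElem_mem hi)
  have hj' : j < (g[i]).toList.length := lt_of_lt_of_le hj hlen
  unfold aGetC pvCell pvRows
  rw [PySem.List.pyGet?_natCast, List.getElem?_eq_getElem hi]
  simp only [Option.bind_some, PySem.Str.pyGet?_natCast]
  have hg : (g.map (fun r => r.toList.take (g.headD "").toList.length)).getD i []
      = (g[i]).toList.take (g.headD "").toList.length := by
    rw [List.getD_eq_getElem _ _ (by simpa using hi), List.getElem_map]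
  rw [List.getElem?_eq_getElem hj', hg,
    List.getD_eq_getElem _ _ (by rw [List.length_take]; omega), List.getElem_take]

theorem condA_eq (g : List String) (h : Pre_flipped g) {i j : Nat} (hi : i < g.length)
    (hj : j < (g.headD "").toList.length) :
    ((aGetC g ↑i ↑j == some 'O') || (aGetC g ↑i ↑j == some '*')
      || (decide (0 ≤ (i:Int) - 1) && (aGetC g ((i:Int)-1) ↑j == some 'O'))
      || (decide ((i:Int) + 1 < (g.length:Int)) && (aGetC g ((i:Int)+1) ↑j == some 'O'))
      || (decide (0 ≤ (j:Int) - 1) && (aGetC g ↑i ((j:Int)-1) == some 'O'))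
      || (decide ((j:Int) + 1 < ((g.headD "").toList.length:Int)) && (aGetC g ↑i ((j:Int)+1) == some 'O')))
    = pvCond (pvRows g) (g.headD "").toList.length i j := by
  have hmG : (pvRows g).length = g.length := by simp [pvRows]
  have e1 : (aGetC g ↑i ↑j == some 'O') = (pvCell (pvRows g) i j == 'O') := by
    rw [aGetC_eq g h hi hj]; simp
  have e2 : (aGetC g ↑i ↑j == some '*') = (pvCell (pvRows g) i j == '*') := by
    rw [aGetC_eq g h hi hj]; simp
  have e3 : (decide (0 ≤ (i:Int) - 1) && (aGetC g ((i:Int)-1) ↑j == some 'O'))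
      = (decide (0 < i) && (pvCell (pvRows g) (i-1) j == 'O')) := by
    have hd : decide (0 ≤ (i:Int) - 1) = decide (0 < i) := by
      simp only [decide_eq_decide]; omega
    rw [hd]
    by_cases h0 : 0 < i
    · rw [show ((i:Int) - 1) = ((i-1 : Nat) : Int) by omega, aGetC_eq g h (by omega) hj]
      simp
    · simp [h0]
  have e4 : (decide ((i:Int) + 1 < (g.length:Int)) && (aGetC g ((i:Int)+1) ↑j == some 'O'))
      = (decide (i+1 < g.length) && (pvCell (pvRows g) (i+1) j == 'O')) := by
    have hd : decide ((i:Int) + 1 < (g.length:Int)) = decide (i+1 < g.length) := by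
      simp only [decide_eq_decide]; omega
    rw [hd]
    by_cases h0 : i + 1 < g.length
    · rw [show ((i:Int) + 1) = ((i+1 : Nat) : Int) by omega, aGetC_eq g h h0 hj]
      simp
    · simp [h0]
  have e5 : (decide (0 ≤ (j:Int) - 1) && (aGetC g ↑i ((j:Int)-1) == some 'O'))
      = (decide (0 < j) && (pvCell (pvRows g) i (j-1) == 'O')) := by
    have hd : decide (0 ≤ (j:Int) - 1) = decide (0 < j) := by
      simp only [decide_eq_decide]; omega
    rw [hd]
    by_cases h0 : 0 < j
    · rw [show ((j:Int) - 1) = ((j-1 : Nat) : Int) by omega, aGetC_eq g h hi (by omega)]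
      simp
    · simp [h0]
  have e6 : (decide ((j:Int) + 1 < (((g.headD "").toList.length:Nat):Int)) && (aGetC g ↑i ((j:Int)+1) == some 'O'))
      = (decide (j+1 < (g.headD "").toList.length) && (pvCell (pvRows g) i (j+1) == 'O')) := by
    have hd : decide ((j:Int) + 1 < (((g.headD "").toList.length:Nat):Int)) = decide (j+1 < (g.headD "").toList.length) := by
      simp only [decide_eq_decide]; omega
    rw [hd]
    by_cases h0 : j + 1 < (g.headD "").toList.length
    · rw [show ((j:Int) + 1) = ((j+1 : Nat) : Int) by omega, aGetC_eq g h hi h0]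
      simp
    · rw [decide_eq_false h0]
      simp
  unfold pvCond
  rw [e1, e2, e3, e4, e5, e6, hmG]

theorem cellA_char (g : List String) (h : Pre_flipped g) {i j : Nat} (hi : i < g.length)
    (hj : j < (g.headD "").toList.length) :
    (if ((some (if ((aGetC g ↑i ↑j == some 'O') || (aGetC g ↑i ↑j == some '*')
          || (decide (0 ≤ (i:Int) - 1) && (aGetC g ((i:Int)-1) ↑j == some 'O'))
          || (decide ((i:Int) + 1 < (g.length:Int)) && (aGetC g ((i:Int)+1) ↑j == some 'O'))
          || (decide (0 ≤ (j:Int) - 1) && (aGetC g ↑i ((j:Int)-1) == some 'O'))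
          || (decide ((j:Int) + 1 < (((g.headD "").toList.length:Nat):Int)) && (aGetC g ↑i ((j:Int)+1) == some 'O')))
        then '*' else '.') == some '*')) then '.' else 'O')
      = (if pvCond (pvRows g) (g.headD "").toList.length i j then '.' else 'O') := by
  rw [condA_eq g h hi hj]
  cases hc : pvCond (pvRows g) (g.headD "").toList.length i j <;> simp

theorem flipped_eq_target (g : List String) (h : Pre_flipped g) :
    flipped g = pvTarget (pvRows g) (g.headD "").toList.length := by
  unfold flipped
  have hh : PySem.List.pyGetD g 0 "" = g.headD "" := by
    rw [PySem.List.pyGetD_zero]; cases g <;> rfl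
  simp only [PySem.List.len_eq, hh, PySem.Str.len_eq]
  rw [PySem.List.pyRange_zero_natCast, PySem.List.pyRange_zero_natCast]
  simp only [List.foldl_map, PySem.List.foldl_append_singleton_eq_map, List.nil_append]
  unfold pvTarget
  have hmG : (pvRows g).length = g.length := by simp [pvRows]
  rw [hmG]
  apply List.map_congr_left
  intro i hi
  rw [List.mem_range] at hi
  congr 1
  apply List.map_congr_left
  intro j hj
  rw [List.mem_range] at hj
  simp only [PySem.List.pyGet?_natCast, List.getElem?_map, List.getElem?_range hi,
    List.getElem?_range hj, Option.map_some, Option.bind_some]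
  exact cellA_char g h hi hj

theorem length_bRow (c u d l r : List Char) :
    (bRow c u d l r).length = min c.length (min u.length (min d.length (min l.length r.length))) := by
  induction c generalizing u d l r with
  | nil => simp [bRow]
  | cons ch ct ih =>
    cases u with
    | nil => simp [bRow]
    | cons uh ut =>
      cases d with
      | nil => simp [bRow]
      | cons dh dt =>
        cases l with
        | nil => simp [bRow]
        | cons lh lt =>
          cases r with
          | nil => simp [bRow]
          | cons rh rt => simp [bRow, ih]

theorem bRow_getD (c u d l r : List Char) (j : Nat) (h1 : j < c.length) (h2 : j < u.length)
    (h3 : j < d.length) (h4 : j < l.length) (h5 : j < r.length) :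
    (bRow c u d l r).getD j 'x' =
      if (c.getD j 'x' == 'O') || (c.getD j 'x' == '*') || (u.getD j 'x' == 'O')
        || (d.getD j 'x' == 'O') || (l.getD j 'x' == 'O') || (r.getD j 'x' == 'O')
      then '.' else 'O' := by
  induction c generalizing u d l r j with
  | nil => simp at h1
  | cons ch ct ih =>
    cases u with | nil => simp at h2 | cons uh ut =>
    cases d with | nil => simp at h3 | cons dh dt =>
    cases l with | nil => simp at h4 | cons lh lt =>
    cases r with | nil => simp at h5 | cons rh rt =>
    cases j with
    | zero => simp [bRow]
    | succ k =>
      simp only [bRow, List.getD_cons_succ]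
      exact ih ut dt lt rt k (by simpa using h1) (by simpa using h2) (by simpa using h3)
        (by simpa using h4) (by simpa using h5)

theorem getD_dropLast' {α : Type} (l : List α) (k : Nat) (d : α) (hk : k < l.length - 1) :
    l.dropLast.getD k d = l.getD k d := by
  rw [List.getD_eq_getElem _ _ (by simp; omega), List.getElem_dropLast,
    List.getD_eq_getElem _ _ (by omega)]

theorem getD_tail' {α : Type} (l : List α) (k : Nat) (d : α) (hk : k + 1 < l.length) :
    l.tail.getD k d = l.getD (k+1) d := by
  rw [List.getD_eq_getElem _ _ (by simp; omega), List.getElem_tail,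
    List.getD_eq_getElem _ _ (by omega)]

theorem rowlen (g : List String) (h : Pre_flipped g) {k : Nat} (hk : k < g.length) :
    ((pvRows g).getD k []).length = (g.headD "").toList.length := by
  have : (pvRows g).getD k [] = (g[k]).toList.take (g.headD "").toList.length := by
    rw [pvRows, List.getD_eq_getElem _ _ (by simpa using hk), List.getElem_map]
  rw [this, List.length_take]
  have := h.2 _ (g.getElem_mem hk)
  omega

theorem getD_replicate_dot (n j : Nat) (hj : j < n) :
    (List.replicate n '.').getD j 'x' = '.' := by
  rw [List.getD_eq_getElem _ _ (by simpa using hj)]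
  simp

theorem bcell (g : List String) (h : Pre_flipped g) {i : Nat} (hi : i < g.length) :
    bRow ((pvRows g).getD i [])
      ((List.replicate (g.headD "").toList.length '.' :: (pvRows g).dropLast).getD i [])
      (((pvRows g).tail ++ [List.replicate (g.headD "").toList.length '.']).getD i [])
      ('.' :: ((pvRows g).getD i []).dropLast)
      (((pvRows g).getD i []).tail ++ ['.'])
    = (List.range (g.headD "").toList.length).map
        (fun j => if pvCond (pvRows g) (g.headD "").toList.length i j then '.' else 'O') := by
  have hGlen : (pvRows g).length = g.length := by simp [pvRows]
  set n0 := (g.headD "").toList.length with hn0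
  have hclen : ((pvRows g).getD i []).length = n0 := rowlen g h hi
  have hulen : ((List.replicate n0 '.' :: (pvRows g).dropLast).getD i []).length = n0 := by
    cases i with
    | zero => simp
    | succ k =>
      rw [List.getD_cons_succ, getD_dropLast' _ _ _ (by omega)]
      exact rowlen g h (by omega)
  have hdlen : (((pvRows g).tail ++ [List.replicate n0 '.']).getD i []).length = n0 := by
    by_cases hilast : i + 1 < g.length
    · rw [List.getD_append _ _ _ _ (by rw [List.length_tail, hGlen]; omega),
        getD_tail' _ _ _ (by rw [hGlen]; omega)]
      exact rowlen g h (by omega)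
    · rw [List.getD_append_right _ _ _ _ (by rw [List.length_tail, hGlen]; omega)]
      rw [List.length_tail, hGlen, show i - (g.length - 1) = 0 by omega]
      simp
  apply List.ext_getElem
  · rw [length_bRow]
    simp only [hclen, hulen, hdlen, List.length_cons, List.length_dropLast,
      List.length_append, List.length_tail, List.length_map, List.length_range]
    omega
  · intro j hj1 hj2
    have hjn : j < n0 := by simpa using hj2
    rw [← List.getD_eq_getElem _ 'x' hj1, ← List.getD_eq_getElem _ 'x' hj2]
    rw [bRow_getD _ _ _ _ _ j (by omega) (by omega) (by omega)
      (by rw [List.length_cons, List.length_dropLast, hclen]; omega)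
      (by rw [List.length_append, List.length_tail, hclen, List.length_singleton]; omega)]
    have hu : ((List.replicate n0 '.' :: (pvRows g).dropLast).getD i []).getD j 'x'
        = if 0 < i then pvCell (pvRows g) (i-1) j else '.' := by
      cases i with
      | zero => simpa using getD_replicate_dot n0 j hjn
      | succ k =>
        rw [List.getD_cons_succ, getD_dropLast' _ _ _ (by omega)]
        simp [pvCell]
    have hd : (((pvRows g).tail ++ [List.replicate n0 '.']).getD i []).getD j 'x'
        = if i + 1 < g.length then pvCell (pvRows g) (i+1) j else '.' := by
      by_cases hilast : i + 1 < g.length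
      · rw [List.getD_append _ _ _ _ (by rw [List.length_tail, hGlen]; omega),
          getD_tail' _ _ _ (by rw [hGlen]; omega)]
        simp [pvCell, hilast]
      · rw [List.getD_append_right _ _ _ _ (by rw [List.length_tail, hGlen]; omega)]
        rw [List.length_tail, hGlen, show i - (g.length - 1) = 0 by omega]
        simpa [hilast] using getD_replicate_dot n0 j hjn
    have hl : ('.' :: ((pvRows g).getD i []).dropLast).getD j 'x'
        = if 0 < j then pvCell (pvRows g) i (j-1) else '.' := by
      cases j with
      | zero => simp
      | succ k =>
        rw [List.getD_cons_succ, getD_dropLast' _ _ _ (by omega)]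
        simp [pvCell]
    have hr : (((pvRows g).getD i []).tail ++ ['.']).getD j 'x'
        = if j + 1 < n0 then pvCell (pvRows g) i (j+1) else '.' := by
      by_cases hjlast : j + 1 < n0
      · rw [List.getD_append _ _ _ _ (by rw [List.length_tail, hclen]; omega),
          getD_tail' _ _ _ (by rw [hclen]; omega)]
        simp [pvCell, hjlast]
      · rw [List.getD_append_right _ _ _ _ (by rw [List.length_tail, hclen]; omega)]
        rw [List.length_tail, hclen, show j - (n0 - 1) = 0 by omega]
        simp [hjlast]
    rw [hu, hd, hl, hr]
    rw [List.getD_eq_getElem _ _ hj2, List.getElem_map, List.getElem_range]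
    have hcell : ((pvRows g).getD i []).getD j 'x' = pvCell (pvRows g) i j := rfl
    rw [hcell]
    unfold pvCond
    rw [hGlen]
    by_cases h1 : 0 < i <;> by_cases h2 : i + 1 < g.length <;>
      by_cases h3 : 0 < j <;> by_cases h4 : j + 1 < n0 <;>
      simp [h1, h2, h3, h4]

theorem flipped_alt_eq_target (g : List String) (h : Pre_flipped g) :
    flipped_alt g = pvTarget (pvRows g) (g.headD "").toList.length := by
  unfold flipped_alt
  have hh : PySem.List.pyGetD g 0 "" = g.headD "" := by
    rw [PySem.List.pyGetD_zero]; cases g <;> rfl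
  simp only [hh, PySem.Str.len_eq, PySem.List.slice_to_natCast, PySem.List.slice_to_neg_one,
    PySem.List.slice_from_one, PySem.List.pyRepeat_singleton, Int.toNat_natCast,
    PySem.List.foldl_append_singleton_eq_map, List.nil_append]
  have hG : List.map (fun r => List.take (g.headD "").toList.length r.toList) g = pvRows g := rfl
  rw [hG]
  have hGlen : (pvRows g).length = g.length := by simp [pvRows]
  have hm : 0 < g.length := List.length_pos_of_ne_nil h.1
  apply List.ext_getElem
  · simp only [List.length_map, List.length_zip, List.length_cons, List.length_dropLast,
      List.length_append, List.length_tail, pvTarget, List.length_range, hGlen]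
    omega
  · intro i h1 h2
    have him : i < g.length := by
      simp only [pvTarget, List.length_map, List.length_range, hGlen] at h2
      exact h2
    rw [List.getElem_map, List.getElem_zip, List.getElem_zip]
    simp only [pvTarget, List.getElem_map, List.getElem_range]
    congr 1
    have e1 : (pvRows g)[i]'(by omega) = (pvRows g).getD i [] :=
      (List.getD_eq_getElem _ _ (by omega)).symm
    have e2 : (List.replicate (g.headD "").toList.length '.' :: (pvRows g).dropLast)[i]'(by simp; omega)
        = (List.replicate (g.headD "").toList.length '.' :: (pvRows g).dropLast).getD i [] :=
      (List.getD_eq_getElem _ _ (by simp; omega)).symm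
    have e3 : ((pvRows g).tail ++ [List.replicate (g.headD "").toList.length '.'])[i]'(by simp; omega)
        = ((pvRows g).tail ++ [List.replicate (g.headD "").toList.length '.']).getD i [] :=
      (List.getD_eq_getElem _ _ (by simp; omega)).symm
    rw [e1, e2, e3]
    exact bcell g h him

-- ===== VERDICT (by name: the statement is the Claim_ definition above) =====
theorem flipped_spec : Claim_equal_flipped := by
  intro g _ hpre
  unfold Spec_flipped
  rw [flipped_eq_target g hpre, flipped_alt_eq_target g hpre]
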